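-- pv_equiv track=rewrite | github.com/DimitriZC/Vibes | utils/functions.py | maximum_diff
-- ===== SOURCE A (Python) =====
-- def maximum_diff(time, method1, method2):
--     max_diff = 0
--     temp_time = 0
--     for i in range(len(time)):
--         temp_diff = abs(method1[i] - method2[i])
--         if temp_diff >= max_diff:
--             max_diff = temp_diff
--             temp_time = time[i]
--     return temp_time, max_diff
-- ===== SOURCE B (Python) =====
-- def maximum_diff(time, method1, method2):
--     diffs = [abs(method1[i] - method2[i]) for i in range(len(time))]
--     if not diffs:
--         return 0, 0
--     max_diff = max(diffs)
--     idx = len(diffs) - 1 - diffs[::-1].index(max_diff)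
--     return time[idx], max_diff
-- ===== Notes on version B (the rewrite author's own statement) =====
-- stated objective: simpler
-- what changed: Replaces A's fused single scan with running max/argmax state by a table-building comprehension followed by a separate max() and a last-occurrence index lookup (len-1 - reversed.index), preserving A's last-index tie-break.
import Mathlib
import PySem

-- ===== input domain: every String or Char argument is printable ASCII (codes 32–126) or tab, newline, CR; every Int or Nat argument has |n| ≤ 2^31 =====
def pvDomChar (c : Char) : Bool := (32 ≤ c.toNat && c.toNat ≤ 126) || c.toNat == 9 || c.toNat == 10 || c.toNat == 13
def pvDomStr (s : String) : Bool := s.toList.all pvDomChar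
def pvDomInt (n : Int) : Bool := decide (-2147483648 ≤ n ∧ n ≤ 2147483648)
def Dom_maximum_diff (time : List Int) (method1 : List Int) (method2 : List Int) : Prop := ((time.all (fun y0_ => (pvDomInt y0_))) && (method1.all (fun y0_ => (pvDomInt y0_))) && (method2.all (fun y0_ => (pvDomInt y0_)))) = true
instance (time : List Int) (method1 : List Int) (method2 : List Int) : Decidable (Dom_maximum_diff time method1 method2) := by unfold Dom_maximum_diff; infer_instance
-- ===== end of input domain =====

-- B replaces A's fused running-max scan by a diffs table, a separate max() pass and a
-- last-occurrence index lookup; objective: simpler decomposition, same O(n) cost.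

-- ===== PORT A =====
-- state s = (max_diff, temp_time); 'temp_diff >= max_diff' is 's.1 ≤ d'
def maximum_diff (time : List Int) (method1 : List Int) (method2 : List Int) : Int × Int :=
  let st := (PySem.List.pyRange 0 (time.length : Int) 1).foldl
    (fun (s : Int × Int) i =>
      let d := |PySem.List.pyGetD method1 i 0 - PySem.List.pyGetD method2 i 0|
      if s.1 ≤ d then (d, PySem.List.pyGetD time i 0) else s)
    (0, 0)
  (st.2, st.1)

-- ===== PORT B =====
-- diffs[::-1] is ported as List.reverse (PySem.List.slice?_none_none_neg_one)
def maximum_diff_alt (time : List Int) (method1 : List Int) (method2 : List Int) : Int × Int :=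
  let diffs := (PySem.List.pyRange 0 (time.length : Int) 1).map
    (fun i => |PySem.List.pyGetD method1 i 0 - PySem.List.pyGetD method2 i 0|)
  if diffs = [] then (0, 0)
  else
    let m := (PySem.List.max? diffs (fun x => x)).getD 0
    let idx : Int := (diffs.length : Int) - 1 - ((PySem.List.index? diffs.reverse m).getD 0 : Nat)
    (PySem.List.pyGetD time idx 0, m)

-- ===== PRECONDITION & SPEC =====
-- Pre_ excludes exactly the inputs where the Python A raises IndexError:
-- method1 or method2 shorter than time (both programs index method1[i], method2[i] for i < len(time)).
def Pre_maximum_diff (time : List Int) (method1 : List Int) (method2 : List Int) : Prop :=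
  time.length ≤ method1.length ∧ time.length ≤ method2.length
instance (time : List Int) (method1 : List Int) (method2 : List Int) : Decidable (Pre_maximum_diff time method1 method2) := by unfold Pre_maximum_diff; infer_instance

def pvWitness_maximum_diff : List Int × List Int × List Int := ([1, 2, 3], [0, 5, 1], [2, 2, 2])

def Spec_maximum_diff (time : List Int) (method1 : List Int) (method2 : List Int) (out : Int × Int) : Prop := out = maximum_diff_alt time method1 method2
instance (time : List Int) (method1 : List Int) (method2 : List Int) (out : Int × Int) : Decidable (Spec_maximum_diff time method1 method2 out) := by unfold Spec_maximum_diff; infer_instance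

-- ===== CLAIM (what is proved, stated in full; the proofs are below) =====
def Claim_equal_maximum_diff : Prop := ∀ (time : List Int) (method1 : List Int) (method2 : List Int), Dom_maximum_diff time method1 method2 → Pre_maximum_diff time method1 method2 → Spec_maximum_diff time method1 method2 (maximum_diff time method1 method2)

-- ===== LEMMAS AND PROOFS =====

lemma max_append_singleton (L : List Int) (x : Int) (hL : L ≠ []) :
    (PySem.List.max? (L ++ [x]) (fun y => y)).getD 0
      = max ((PySem.List.max? L (fun y => y)).getD 0) x := by
  obtain ⟨h, t, rfl⟩ := List.exists_cons_of_ne_nil hL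
  rw [List.cons_append, PySem.List.max?_id_cons, PySem.List.max?_id_cons]
  simp [List.foldl_append]

lemma fold_argmax (f g : Int → Int) (hf : ∀ i, 0 ≤ f i) :
    ∀ n : Nat, 0 < n →
    ((PySem.List.pyRange 0 (n : Int) 1).foldl
        (fun (s : Int × Int) i => if s.1 ≤ f i then (f i, g i) else s) (0, 0))
      = (((PySem.List.max? ((PySem.List.pyRange 0 (n : Int) 1).map f) (fun x => x)).getD 0),
         g ((n : Int) - 1 -
            ((PySem.List.index? ((PySem.List.pyRange 0 (n : Int) 1).map f).reverse
                ((PySem.List.max? ((PySem.List.pyRange 0 (n : Int) 1).map f) (fun x => x)).getD 0)).getD 0 : Nat))) := by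
  intro n
  induction n with
  | zero => intro h; omega
  | succ k ih =>
    intro _
    by_cases hk : 0 < k
    · have hsplit : PySem.List.pyRange 0 ((k + 1 : Nat) : Int) 1
          = PySem.List.pyRange 0 (k : Int) 1 ++ [(k : Int)] := by
        push_cast
        exact PySem.List.pyRange_one_succ_right (Int.natCast_nonneg k)
      have hLne : ((PySem.List.pyRange 0 (k : Int) 1).map f) ≠ [] := by
        have : ((PySem.List.pyRange 0 (k : Int) 1).map f).length = k := by
          simp [PySem.List.length_pyRange_one]
        intro hc; rw [hc] at this; simp at this; omega
      rw [hsplit, List.foldl_append, List.map_append, ih hk]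
      set L := (PySem.List.pyRange 0 (k : Int) 1).map f with hL
      set M := (PySem.List.max? L (fun x => x)).getD 0 with hM
      simp only [List.foldl_cons, List.foldl_nil, List.map_cons, List.map_nil]
      rw [max_append_singleton L (f k) hLne]
      by_cases hc : M ≤ f k
      · rw [if_pos hc, max_eq_right hc]
        have hrev : (L ++ [f k]).reverse = f k :: L.reverse := by simp
        rw [hrev, PySem.List.index?_cons_self]
        simp only [Option.getD_some, Nat.cast_zero]
        push_cast
        ring_nf
      · rw [if_neg hc]
        have hlt : f k < M := lt_of_not_ge hc
        rw [max_eq_left (le_of_lt hlt)]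
        have hrev : (L ++ [f k]).reverse = f k :: L.reverse := by simp
        rw [hrev, PySem.List.index?_cons_of_ne L.reverse (ne_of_lt hlt)]
        -- M ∈ L
        obtain ⟨m, hm⟩ : ∃ m, PySem.List.max? L (fun x => x) = some m := by
          cases hmx : PySem.List.max? L (fun x => x) with
          | none => exact absurd ((PySem.List.max?_eq_none_iff L (fun x => x)).mp hmx) hLne
          | some m => exact ⟨m, rfl⟩
        have hMm : M = m := by rw [hM, hm]; rfl
        have hmem : M ∈ L.reverse := by
          rw [List.mem_reverse, hMm]; exact PySem.List.max?_mem hm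
        obtain ⟨j, hj⟩ := Option.isSome_iff_exists.mp ((PySem.List.index?_isSome_iff L.reverse M).mpr hmem)
        rw [hj]
        simp only [Option.map_some, Option.getD_some]
        have harg : ((k + 1 : Nat) : Int) - 1 - ((j + 1 : Nat) : Int) = (k : Int) - 1 - (j : Nat) := by
          push_cast; ring
        rw [harg]
    · have hk0 : k = 0 := by omega
      subst hk0
      have h1 : PySem.List.pyRange 0 ((0 + 1 : Nat) : Int) 1 = [0] := by
        norm_num
        exact PySem.List.pyRange_one_singleton 0
      rw [h1]
      simp [PySem.List.max?_id_cons, hf 0]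

-- ===== VERDICT (by name: the statement is the Claim_ definition above) =====
theorem maximum_diff_spec : Claim_equal_maximum_diff := by
  intro time m1 m2 _ _
  unfold Spec_maximum_diff maximum_diff maximum_diff_alt
  rcases Nat.eq_zero_or_pos time.length with h0 | hpos
  · simp [h0]
  · have key := fold_argmax (fun i => |PySem.List.pyGetD m1 i 0 - PySem.List.pyGetD m2 i 0|)
      (fun i => PySem.List.pyGetD time i 0) (fun _ => abs_nonneg _) time.length hpos
    have hlen : ((PySem.List.pyRange 0 (time.length : Int) 1).map
        (fun i => |PySem.List.pyGetD m1 i 0 - PySem.List.pyGetD m2 i 0|)).length = time.length := by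
      simp [PySem.List.length_pyRange_one]
    have hne : ((PySem.List.pyRange 0 (time.length : Int) 1).map
        (fun i => |PySem.List.pyGetD m1 i 0 - PySem.List.pyGetD m2 i 0|)) ≠ [] := by
      intro hc; rw [hc] at hlen; simp at hlen; omega
    simp only [key, hne, hlen]
    simp
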